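-- pv_equiv track=rewrite | github.com/eliasurrar/Rosetta | old_scripts/CuRec_ANN_Bayesian_v1_withReactors.py | get_excluded_ids
-- ===== SOURCE A (Python) =====
-- def get_excluded_ids(test_sample_id):
--     paired_groups = [
--         {'015_jetti_project_file_amcf_6in', '015_jetti_project_file_amcf_8in', '003_jetti_project_file_amcf_head', '006_jetti_project_file_pvo'},
--         {'jetti_file_elephant_ii_ugm2', 'jetti_file_elephant_ii_ugm2_coarse'}
--     ]
--     for group in paired_groups:
--         if test_sample_id in group:
--             return group
--     return {test_sample_id}
-- ===== SOURCE B (Python) =====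
-- # B: represent the pairing as an equivalence on ids via a representative map,
-- # then rebuild the group of the query's class by one filter pass over all known ids.
-- _REP = {
--     '015_jetti_project_file_amcf_6in': '015_jetti_project_file_amcf_6in',
--     '015_jetti_project_file_amcf_8in': '015_jetti_project_file_amcf_6in',
--     '003_jetti_project_file_amcf_head': '015_jetti_project_file_amcf_6in',
--     '006_jetti_project_file_pvo': '015_jetti_project_file_amcf_6in',
--     'jetti_file_elephant_ii_ugm2': 'jetti_file_elephant_ii_ugm2',
--     'jetti_file_elephant_ii_ugm2_coarse': 'jetti_file_elephant_ii_ugm2',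
-- }
--
-- def get_excluded_ids(test_sample_id):
--     rep = _REP.get(test_sample_id, test_sample_id)
--     group = {sid for sid in _REP if _REP[sid] == rep}
--     return group or {test_sample_id}
-- ===== Notes on version B (the rewrite author's own statement) =====
-- stated objective: alternative
-- what changed: B models the pairing as an equivalence relation: a representative map from each id to its class representative, then reconstructs the query's group by one filter pass over all known ids (group or singleton via Python's or), instead of A's loop over group sets with membership tests.
import Mathlib
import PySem

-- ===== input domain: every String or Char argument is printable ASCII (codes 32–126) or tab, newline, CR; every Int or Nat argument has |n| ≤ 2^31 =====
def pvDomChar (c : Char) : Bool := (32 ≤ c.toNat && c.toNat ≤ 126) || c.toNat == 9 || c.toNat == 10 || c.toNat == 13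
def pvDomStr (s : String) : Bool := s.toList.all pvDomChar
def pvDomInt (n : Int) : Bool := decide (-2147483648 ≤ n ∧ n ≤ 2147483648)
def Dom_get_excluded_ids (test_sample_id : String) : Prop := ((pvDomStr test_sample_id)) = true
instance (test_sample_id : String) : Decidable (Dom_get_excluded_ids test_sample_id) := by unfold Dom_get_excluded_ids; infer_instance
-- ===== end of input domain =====

-- B recasts the pairing as an equivalence relation (a representative map) and rebuilds the
-- query's class by one filter over all known ids, instead of A's loop over group sets (alternative).
-- Return values are Python sets, ported as lists of their distinct elements.

-- ===== PORT A =====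
-- the two literal paired groups (Python set literals, as lists of their distinct elements)
def pvGroup1 : List String :=
  ["015_jetti_project_file_amcf_6in", "015_jetti_project_file_amcf_8in",
   "003_jetti_project_file_amcf_head", "006_jetti_project_file_pvo"]

def pvGroup2 : List String :=
  ["jetti_file_elephant_ii_ugm2", "jetti_file_elephant_ii_ugm2_coarse"]

-- the 'for group in paired_groups: if test_sample_id in group: return group' loop
def pvLoopA (test_sample_id : String) : List (List String) → List String
  | [] => [test_sample_id]
  | g :: rest => if test_sample_id ∈ g then g else pvLoopA test_sample_id rest

def get_excluded_ids (test_sample_id : String) : List String :=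
  let paired_groups := [pvGroup1, pvGroup2]
  pvLoopA test_sample_id paired_groups

-- ===== PORT B =====
-- the module-level representative map _REP (dict literal, insertion order)
def pvRep : PySem.Dict String String :=
  PySem.Dict.mk   -- dict literal: six distinct keys in source order
    [("015_jetti_project_file_amcf_6in", "015_jetti_project_file_amcf_6in"),
     ("015_jetti_project_file_amcf_8in", "015_jetti_project_file_amcf_6in"),
     ("003_jetti_project_file_amcf_head", "015_jetti_project_file_amcf_6in"),
     ("006_jetti_project_file_pvo", "015_jetti_project_file_amcf_6in"),
     ("jetti_file_elephant_ii_ugm2", "jetti_file_elephant_ii_ugm2"),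
     ("jetti_file_elephant_ii_ugm2_coarse", "jetti_file_elephant_ii_ugm2")]

def get_excluded_ids_alt (test_sample_id : String) : List String :=
  let rep := pvRep.getD test_sample_id test_sample_id
  -- {sid for sid in _REP if _REP[sid] == rep}: the dict's keys are distinct, so this set's
  -- distinct-element list is exactly the filtered key list (iteration = insertion order)
  let group := pvRep.keys.filter (fun sid => pvRep.get? sid == some rep)
  -- 'group or {test_sample_id}': the empty set is falsy
  if group.isEmpty then [test_sample_id] else group

-- ===== PRECONDITION & SPEC =====
def Spec_get_excluded_ids (test_sample_id : String) (out : List String) : Prop := out = get_excluded_ids_alt test_sample_id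
instance (test_sample_id : String) (out : List String) : Decidable (Spec_get_excluded_ids test_sample_id out) := by unfold Spec_get_excluded_ids; infer_instance

-- ===== CLAIM (what is proved, stated in full; the proofs are below) =====
def Claim_equal_get_excluded_ids : Prop := ∀ (test_sample_id : String), Dom_get_excluded_ids test_sample_id → Spec_get_excluded_ids test_sample_id (get_excluded_ids test_sample_id)

-- ===== LEMMAS AND PROOFS =====

-- ===== VERDICT (by name: the statement is the Claim_ definition above) =====
theorem get_excluded_ids_spec : Claim_equal_get_excluded_ids := by
  intro s _
  unfold Spec_get_excluded_ids
  by_cases h1 : s = "015_jetti_project_file_amcf_6in"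
  · subst h1; decide
  by_cases h2 : s = "015_jetti_project_file_amcf_8in"
  · subst h2; decide
  by_cases h3 : s = "003_jetti_project_file_amcf_head"
  · subst h3; decide
  by_cases h4 : s = "006_jetti_project_file_pvo"
  · subst h4; decide
  by_cases h5 : s = "jetti_file_elephant_ii_ugm2"
  · subst h5; decide
  by_cases h6 : s = "jetti_file_elephant_ii_ugm2_coarse"
  · subst h6; decide
  -- s is none of the six known ids: both programs return the singleton [s]
  unfold get_excluded_ids get_excluded_ids_alt pvRep
  have b1 : (("015_jetti_project_file_amcf_6in" : String) == s) = false :=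
    beq_eq_false_iff_ne.mpr (Ne.symm h1)
  have b2 : (("015_jetti_project_file_amcf_8in" : String) == s) = false :=
    beq_eq_false_iff_ne.mpr (Ne.symm h2)
  have b3 : (("003_jetti_project_file_amcf_head" : String) == s) = false :=
    beq_eq_false_iff_ne.mpr (Ne.symm h3)
  have b4 : (("006_jetti_project_file_pvo" : String) == s) = false :=
    beq_eq_false_iff_ne.mpr (Ne.symm h4)
  have b5 : (("jetti_file_elephant_ii_ugm2" : String) == s) = false :=
    beq_eq_false_iff_ne.mpr (Ne.symm h5)
  have b6 : (("jetti_file_elephant_ii_ugm2_coarse" : String) == s) = false :=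
    beq_eq_false_iff_ne.mpr (Ne.symm h6)
  simp [pvLoopA, pvGroup1, pvGroup2, PySem.Dict.getD, PySem.Dict.get?, PySem.Dict.keys,
        List.find?, List.filter, h1, h2, h3, h4, h5, h6, b1, b2, b3, b4, b5, b6]
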